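-- pv_equiv track=rewrite | github.com/CaoJiahao2/AI-EXP | exps/mofan.py | get_face_edge
-- ===== SOURCE A (Python) =====
-- FACES = ['U', 'D', 'F', 'B', 'L', 'R']  # 上, 下, 前, 后, 左, 右
--
-- def face_id(face):
--     """
--     返回面名称对应的索引。
--     FACES = ['U', 'D', 'F', 'B', 'L', 'R']
--     'U' -> 0, 'D' ->1, 'F'->2, 'B'->3, 'L'->4, 'R'->5
--     """
--     return FACES.index(face)
--
-- def get_face_edge(face, edge):
--     """
--     获取指定面某一边的魔方块ID列表。
--     edge: 'top', 'bottom', 'left', 'right'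
--     返回列表按照从左到右的顺序
--     """
--     face_idx = face_id(face)
--     stickers = []
--     if edge == 'top':
--         row = 0
--         for col in range(3):
--             stickers.append(face_idx * 9 + row * 3 + col)
--     elif edge == 'bottom':
--         row = 2
--         for col in range(3):
--             stickers.append(face_idx * 9 + row * 3 + col)
--     elif edge == 'left':
--         col = 0
--         for row in range(3):
--             stickers.append(face_idx * 9 + row * 3 + col)
--     elif edge == 'right':
--         col = 2
--         for row in range(3):
--             stickers.append(face_idx * 9 + row * 3 + col)
--     return stickers
-- ===== SOURCE B (Python) =====
-- FACES = ['U', 'D', 'F', 'B', 'L', 'R']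
--
-- _EDGE_OFFSETS = {'top': [0, 1, 2], 'bottom': [6, 7, 8],
--                  'left': [0, 3, 6], 'right': [2, 5, 8]}
--
-- def get_face_edge(face, edge):
--     base = FACES.index(face) * 9
--     return [base + o for o in _EDGE_OFFSETS.get(edge, [])]
-- ===== Notes on version B (the rewrite author's own statement) =====
-- stated objective: simpler
-- what changed: Replaces the four branch-and-loop blocks with a fixed edge-to-offsets table and a single comprehension over base + offset.
import Mathlib
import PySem

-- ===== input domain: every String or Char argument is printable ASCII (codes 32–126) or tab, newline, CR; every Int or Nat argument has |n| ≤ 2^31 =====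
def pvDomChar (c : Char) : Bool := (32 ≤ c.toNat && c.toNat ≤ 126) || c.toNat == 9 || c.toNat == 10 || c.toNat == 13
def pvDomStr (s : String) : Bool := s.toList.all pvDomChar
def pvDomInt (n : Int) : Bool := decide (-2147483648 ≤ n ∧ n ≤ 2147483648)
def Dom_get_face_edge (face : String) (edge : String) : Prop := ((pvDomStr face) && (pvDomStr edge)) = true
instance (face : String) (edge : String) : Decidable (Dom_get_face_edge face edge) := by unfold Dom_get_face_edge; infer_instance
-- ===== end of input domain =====

-- B replaces A's four branch-and-loop blocks with a fixed edge->offsets table and one map over base + offset (objective: simpler).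


-- ===== PORT A =====
def get_face_edge (face : String) (edge : String) : List Int :=
  match PySem.List.index? ["U", "D", "F", "B", "L", "R"] face with
  | none => []  -- FACES.index raises ValueError here; excluded by Pre_
  | some face_idx =>
    if edge == "top" then
      let row : Int := 0
      (PySem.List.pyRange 0 3 1).foldl (fun stickers col => stickers ++ [face_idx * 9 + row * 3 + col]) []
    else if edge == "bottom" then
      let row : Int := 2
      (PySem.List.pyRange 0 3 1).foldl (fun stickers col => stickers ++ [face_idx * 9 + row * 3 + col]) []
    else if edge == "left" then
      let col : Int := 0
      (PySem.List.pyRange 0 3 1).foldl (fun stickers row => stickers ++ [face_idx * 9 + row * 3 + col]) []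
    else if edge == "right" then
      let col : Int := 2
      (PySem.List.pyRange 0 3 1).foldl (fun stickers row => stickers ++ [face_idx * 9 + row * 3 + col]) []
    else []

-- ===== PORT B =====
def pvEdgeOffsets : PySem.Dict String (List Int) :=
  PySem.Dict.ofList [("top", [0, 1, 2]), ("bottom", [6, 7, 8]), ("left", [0, 3, 6]), ("right", [2, 5, 8])]

def get_face_edge_alt (face : String) (edge : String) : List Int :=
  match PySem.List.index? ["U", "D", "F", "B", "L", "R"] face with
  | none => []  -- FACES.index raises ValueError here; excluded by Pre_
  | some i =>
    let base := i * 9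
    ((PySem.Dict.get? pvEdgeOffsets edge).getD []).map (fun o => base + o)

-- ===== PRECONDITION & SPEC =====
-- Pre_ excludes faces outside FACES, on which A's FACES.index raises ValueError (B raises the same ValueError).
def Pre_get_face_edge (face : String) (edge : String) : Prop :=
  face ∈ (["U", "D", "F", "B", "L", "R"] : List String)
instance (face : String) (edge : String) : Decidable (Pre_get_face_edge face edge) := by
  unfold Pre_get_face_edge; infer_instance
def pvWitness_get_face_edge : String × String := ("F", "left")

def Spec_get_face_edge (face : String) (edge : String) (out : List Int) : Prop := out = get_face_edge_alt face edge
instance (face : String) (edge : String) (out : List Int) : Decidable (Spec_get_face_edge face edge out) := by unfold Spec_get_face_edge; infer_instance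

-- ===== CLAIM (what is proved, stated in full; the proofs are below) =====
def Claim_equal_get_face_edge : Prop := ∀ (face : String) (edge : String), Dom_get_face_edge face edge → Pre_get_face_edge face edge → Spec_get_face_edge face edge (get_face_edge face edge)

-- ===== LEMMAS AND PROOFS =====

-- ===== VERDICT (by name: the statement is the Claim_ definition above) =====
-- For any fixed face index, A's branch-and-loop body equals B's table lookup, for every edge.
theorem body_eq (i : Int) (edge : String) :
    (if edge == "top" then
      let row : Int := 0
      (PySem.List.pyRange 0 3 1).foldl (fun stickers col => stickers ++ [i * 9 + row * 3 + col]) []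
    else if edge == "bottom" then
      let row : Int := 2
      (PySem.List.pyRange 0 3 1).foldl (fun stickers col => stickers ++ [i * 9 + row * 3 + col]) []
    else if edge == "left" then
      let col : Int := 0
      (PySem.List.pyRange 0 3 1).foldl (fun stickers row => stickers ++ [i * 9 + row * 3 + col]) []
    else if edge == "right" then
      let col : Int := 2
      (PySem.List.pyRange 0 3 1).foldl (fun stickers row => stickers ++ [i * 9 + row * 3 + col]) []
    else []) =
    ((PySem.Dict.get? pvEdgeOffsets edge).getD []).map (fun o => i * 9 + o) := by
  split_ifs with h1 h2 h3 h4
  · simp only [beq_iff_eq] at h1; subst h1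
    rw [show PySem.Dict.get? pvEdgeOffsets "top" = some ([0, 1, 2] : List Int) from rfl,
        show PySem.List.pyRange 0 3 1 = ([0, 1, 2] : List Int) from rfl]
    norm_num [List.foldl] <;> omega
  · simp only [beq_iff_eq] at h2; subst h2
    rw [show PySem.Dict.get? pvEdgeOffsets "bottom" = some ([6, 7, 8] : List Int) from rfl,
        show PySem.List.pyRange 0 3 1 = ([0, 1, 2] : List Int) from rfl]
    norm_num [List.foldl] <;> omega
  · simp only [beq_iff_eq] at h3; subst h3
    rw [show PySem.Dict.get? pvEdgeOffsets "left" = some ([0, 3, 6] : List Int) from rfl,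
        show PySem.List.pyRange 0 3 1 = ([0, 1, 2] : List Int) from rfl]
    norm_num [List.foldl] <;> omega
  · simp only [beq_iff_eq] at h4; subst h4
    rw [show PySem.Dict.get? pvEdgeOffsets "right" = some ([2, 5, 8] : List Int) from rfl,
        show PySem.List.pyRange 0 3 1 = ([0, 1, 2] : List Int) from rfl]
    norm_num [List.foldl] <;> omega
  · simp only [beq_iff_eq] at h1 h2 h3 h4
    have hnone : PySem.Dict.get? pvEdgeOffsets edge = none := by
      rw [show pvEdgeOffsets = PySem.Dict.mk [("top", ([0, 1, 2] : List Int)), ("bottom", [6, 7, 8]), ("left", [0, 3, 6]), ("right", [2, 5, 8])] from rfl]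
      simp [PySem.Dict.get?_mk_cons, PySem.Dict.get?, Ne.symm h1, Ne.symm h2, Ne.symm h3, Ne.symm h4]
    simp [hnone]

theorem get_face_edge_spec : Claim_equal_get_face_edge := by
  intro face edge _ _
  unfold Spec_get_face_edge get_face_edge get_face_edge_alt
  cases hidx : PySem.List.index? ["U", "D", "F", "B", "L", "R"] face with
  | none => rfl
  | some i => exact body_eq i edge
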